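-- pv_equiv track=rewrite | github.com/KarnParmar/NBO-RE | nbo.py | slice_string
-- ===== SOURCE A (Python) =====
-- def slice_string(string1):
--     tempstr = ''
--     finalarr = []
--     whitespace = []
-- # Find locations of all whitespaces and record values
--     whitespace.append(0) # add a white space for the start
--     for i in range(0,len(string1)):
--         if(string1[i] == ' '):
--             whitespace.append(i)
--     whitespace.append(len(string1))
-- # Append all values inbetween whitespaces into an array
-- # the number of whitespaces determines the number of iterations
--     for j in range(0,len(whitespace)-1):
--         for k in range(whitespace[j],whitespace[j+1]):
--             tempstr += string1[k]
--         finalarr.append(tempstr) # Append the string to the array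
--         tempstr = "" # Clear variable after use
-- # Delete all the extra white spaces in the array
--
--     while (' ' in finalarr):
--         finalarr.remove(' ')
--     #while ('-' in finalarr):
--     #    finalarr.remove('-')
--     while ('' in finalarr):
--         finalarr.remove('')
--     #for (i,v) in enumerate(finalarr):
--     #    finalarr[i] = v.replace('-', '')
--     return finalarr
-- ===== SOURCE B (Python) =====
-- def slice_string(string1):
--     # One-pass two-pointer scan: skip separator spaces, take each maximal
--     # non-space run, prefixing it with one space unless it starts the string.
--     out = []
--     i = 0
--     n = len(string1)
--     while i < n:
--         if string1[i] == ' ':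
--             i += 1
--         else:
--             j = i
--             while j < n and string1[j] != ' ':
--                 j += 1
--             out.append((' ' if i > 0 else '') + string1[i:j])
--             i = j
--     return out
-- ===== Notes on version B (the rewrite author's own statement) =====
-- stated objective: faster
-- what changed: Replaced A's four passes (collect all space indices, rebuild every segment char by char, then two removal loops using repeated list scans) by a single two-pointer scan that emits each non-space run directly, prefixed by one space unless it starts the string.
import Mathlib
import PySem

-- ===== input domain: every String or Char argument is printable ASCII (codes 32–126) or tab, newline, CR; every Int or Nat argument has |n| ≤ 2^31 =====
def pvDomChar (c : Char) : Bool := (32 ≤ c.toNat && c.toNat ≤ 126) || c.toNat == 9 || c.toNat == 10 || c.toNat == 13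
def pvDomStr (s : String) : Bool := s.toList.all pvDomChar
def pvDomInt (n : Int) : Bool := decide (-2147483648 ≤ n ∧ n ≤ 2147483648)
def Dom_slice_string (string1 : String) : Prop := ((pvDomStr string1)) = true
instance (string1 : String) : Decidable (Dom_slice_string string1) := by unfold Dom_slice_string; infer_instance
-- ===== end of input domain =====

-- B replaces A's four passes (space-index list, per-char segment rebuild, two removal loops)
-- by one two-pointer scan emitting each non-space run directly; return values proved equal.

-- ===== PORT A =====
-- the whitespace list: [0] ++ positions of ' ' ++ [len]   (indices of 'for i in range(0,len)' are Nat)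
def pvWsA (cs : List Char) : List Nat :=
  ((List.range cs.length).foldl (fun acc i => if cs.getD i ' ' == ' ' then acc ++ [i] else acc) [0])
    ++ [cs.length]

-- 'for j …: for k in range(ws[j],ws[j+1]): tempstr += s[k]; finalarr.append(tempstr)'
def pvToksA (cs : List Char) (ws : List Nat) : List (List Char) :=
  (List.range (ws.length - 1)).foldl
    (fun acc j =>
      acc ++ [(List.range' (ws.getD j 0) (ws.getD (j + 1) 0 - ws.getD j 0)).foldl
                (fun t k => t ++ [cs.getD k ' ']) []]) []

-- 'while (v in xs): xs.remove(v)' — removes every occurrence of v, keeping order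
def pvRemoveAll (v : List Char) : List (List Char) → List (List Char)
  | [] => []
  | x :: xs => if x = v then pvRemoveAll v xs else x :: pvRemoveAll v xs

def slice_string (string1 : String) : List String :=
  (pvRemoveAll [] (pvRemoveAll [' '] (pvToksA string1.toList (pvWsA string1.toList)))).map
    (fun t => String.ofList t)

-- ===== PORT B =====
-- the outer while loop of Source B; the Bool is 'i = 0' (no space was consumed yet),
-- the inner 'while j < n and s[j] != " "' is the takeWhile/dropWhile split of the rest
def pvGoB : Bool → List Char → List (List Char)
  | _, [] => []
  | atStart, c :: rest =>
    if c = ' ' then pvGoB false rest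
    else (if atStart then c :: rest.takeWhile (· ≠ ' ')
          else ' ' :: c :: rest.takeWhile (· ≠ ' ')) :: pvGoB false (rest.dropWhile (· ≠ ' '))
  termination_by _ cs => cs.length
  decreasing_by all_goals simp [List.length_dropWhile_le]

def slice_string_alt (string1 : String) : List String :=
  (pvGoB true string1.toList).map (fun t => String.ofList t)

-- ===== PRECONDITION & SPEC =====
def Spec_slice_string (string1 : String) (out : List String) : Prop := out = slice_string_alt string1
instance (string1 : String) (out : List String) : Decidable (Spec_slice_string string1 out) := by unfold Spec_slice_string; infer_instance

-- ===== CLAIM (what is proved, stated in full; the proofs are below) =====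
def Claim_equal_slice_string : Prop := ∀ (string1 : String), Dom_slice_string string1 → Spec_slice_string string1 (slice_string string1)

-- ===== LEMMAS AND PROOFS =====

-- the segment cs[a:b] as A's index loop computes it
def pvSeg (cs : List Char) (a b : Nat) : List Char :=
  (List.range' a (b - a)).map (fun k => cs.getD k ' ')

-- A's token list, as a recursion over the list of space positions
def pvPieces (cs : List Char) (a : Nat) : List Nat → List (List Char)
  | [] => [pvSeg cs a cs.length]
  | b :: t => pvSeg cs a b :: pvPieces cs b t

def pvAdjMap (f : Nat → Nat → List Char) : List Nat → List (List Char)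
  | a :: b :: t => f a b :: pvAdjMap f (b :: t)
  | _ => []

def pvSpaceIdx (cs : List Char) : List Nat :=
  (List.range cs.length).filter (fun i => cs.getD i ' ' == ' ')

-- the char-by-char tokenizer both sides are reduced to
def pvConsHead (c : Char) : List (List Char) → List (List Char)
  | [] => [[c]]
  | t :: ts => (c :: t) :: ts

def pvT : List Char → List (List Char)
  | [] => [[]]
  | c :: cs => if c = ' ' then [] :: pvConsHead ' ' (pvT cs) else pvConsHead c (pvT cs)

theorem pvRemoveAll_eq_filter (v : List Char) (xs : List (List Char)) :
    pvRemoveAll v xs = xs.filter (fun x => x ≠ v) := by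
  induction xs with
  | nil => rfl
  | cons x xs ih => by_cases h : x = v <;> simp [pvRemoveAll, h, ih]

theorem pvWsA_eq (cs : List Char) : pvWsA cs = (0 :: pvSpaceIdx cs) ++ [cs.length] := by
  unfold pvWsA pvSpaceIdx
  rw [PySem.List.foldl_append_if]
  simp

theorem range'_succ_map (n a : Nat) : List.range' (a + 1) n = (List.range' a n).map (· + 1) := by
  induction n generalizing a with
  | zero => rfl
  | succ n ih => simp [List.range'_succ, ih]

theorem pvSeg_zero_zero (c : Char) (cs : List Char) : pvSeg (c :: cs) 0 0 = [] := rfl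

theorem pvSeg_shift (c : Char) (cs : List Char) (a b : Nat) :
    pvSeg (c :: cs) (a + 1) (b + 1) = pvSeg cs a b := by
  simp [pvSeg, Nat.succ_sub_succ, range'_succ_map, List.map_map, Function.comp]

theorem pvSeg_zero_succ (c : Char) (cs : List Char) (b : Nat) :
    pvSeg (c :: cs) 0 (b + 1) = c :: pvSeg cs 0 b := by
  simp [pvSeg, List.range'_succ, range'_succ_map, List.map_map, Function.comp]

theorem pvToksA_eq_map (cs : List Char) (ws : List Nat) :
    pvToksA cs ws =
      (List.range (ws.length - 1)).map
        (fun j => pvSeg cs (ws.getD j 0) (ws.getD (j + 1) 0)) := by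
  unfold pvToksA
  rw [PySem.List.foldl_append_singleton_eq_map]
  refine List.map_congr_left (fun j _ => ?_)
  rw [PySem.List.foldl_append_singleton_eq_map]
  rfl

theorem map_range_adj (f : Nat → Nat → List Char) (l : List Nat) :
    (List.range (l.length - 1)).map (fun j => f (l.getD j 0) (l.getD (j + 1) 0)) =
      pvAdjMap f l := by
  match l with
  | [] => rfl
  | [a] => rfl
  | a :: b :: t =>
    have ih := map_range_adj (f := f) (l := b :: t)
    simp only [List.length_cons, Nat.add_sub_cancel] at ih ⊢
    rw [List.range_succ_eq_map]
    simp only [List.map_cons, List.map_map]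
    rw [pvAdjMap]
    refine congrArg₂ _ rfl ?_
    rw [← ih]
    rfl

theorem pvAdjMap_pieces (cs : List Char) (l : List Nat) (a : Nat) :
    pvAdjMap (pvSeg cs) (a :: l ++ [cs.length]) = pvPieces cs a l := by
  induction l generalizing a with
  | nil => rfl
  | cons b t ih =>
    simp only [List.cons_append, pvAdjMap, pvPieces]
    exact congrArg _ (ih b)

theorem pvPieces_shift (c : Char) (cs : List Char) (l : List Nat) (a : Nat) :
    pvPieces (c :: cs) (a + 1) (l.map (· + 1)) = pvPieces cs a l := by
  induction l generalizing a with
  | nil => simp [pvPieces, pvSeg_shift, List.length_cons]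
  | cons b t ih => simp [pvPieces, pvSeg_shift, ih]

theorem pvPieces_cons (c : Char) (cs : List Char) (l : List Nat) :
    pvPieces (c :: cs) 0 (l.map (· + 1)) = pvConsHead c (pvPieces cs 0 l) := by
  cases l with
  | nil => simp [pvPieces, pvConsHead, List.length_cons, pvSeg_zero_succ]
  | cons b t => simp [pvPieces, pvConsHead, pvSeg_zero_succ, pvPieces_shift]

theorem pvSpaceIdx_cons (c : Char) (cs : List Char) :
    pvSpaceIdx (c :: cs) =
      (if c = ' ' then [0] else []) ++ (pvSpaceIdx cs).map (· + 1) := by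
  unfold pvSpaceIdx
  rw [List.length_cons, List.range_succ_eq_map, List.filter_cons]
  simp only [List.getD_cons_zero, List.filter_map]
  by_cases h : c = ' ' <;>
    simp [h, Function.comp_def, Nat.succ_eq_add_one]

theorem pieces_eq_T (cs : List Char) : pvPieces cs 0 (pvSpaceIdx cs) = pvT cs := by
  induction cs with
  | nil => rfl
  | cons c cs ih =>
    rw [pvSpaceIdx_cons]
    by_cases h : c = ' '
    · subst h
      rw [if_pos rfl, List.singleton_append]
      simp only [pvPieces]
      rw [pvPieces_cons, ih, pvSeg_zero_zero]
      simp [pvT]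
    · rw [if_neg h, List.nil_append, pvPieces_cons, ih]
      simp [pvT, h]

-- the filter A applies after tokenising
def pvFilt (xs : List (List Char)) : List (List Char) :=
  xs.filter (fun t => t ≠ [' '] && t ≠ [])

theorem pvFilt_removeAll (xs : List (List Char)) :
    pvRemoveAll [] (pvRemoveAll [' '] xs) = pvFilt xs := by
  rw [pvRemoveAll_eq_filter, pvRemoveAll_eq_filter, pvFilt, List.filter_filter]
  refine List.filter_congr (fun x _ => ?_)
  by_cases h1 : x = [' '] <;> by_cases h2 : x = [] <;> simp [h1, h2]

theorem pvConsHead_ne_nil (c : Char) (l : List (List Char)) : pvConsHead c l ≠ [] := by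
  cases l <;> simp [pvConsHead]

theorem pvT_ne_nil (cs : List Char) : pvT cs ≠ [] := by
  cases cs with
  | nil => simp [pvT]
  | cons c cs => by_cases h : c = ' ' <;> simp [pvT, h, pvConsHead_ne_nil]

theorem pvT_head? (cs : List Char) :
    (pvT cs).head? = some (cs.takeWhile (· ≠ ' ')) := by
  induction cs with
  | nil => rfl
  | cons c cs ih =>
    by_cases h : c = ' '
    · subst h; simp [pvT]
    · cases hT : pvT cs with
      | nil => exact absurd hT (pvT_ne_nil cs)
      | cons t ts =>
        rw [hT] at ih
        simp only [List.head?_cons, Option.some.injEq] at ih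
        simp [pvT, h, hT, pvConsHead, ih]

-- the simultaneous induction: A's filtered tokens are exactly B's scan
theorem main_three (cs : List Char) :
    pvFilt (pvT cs) = pvGoB true cs ∧
    pvFilt (pvConsHead ' ' (pvT cs)) = pvGoB false cs ∧
    pvFilt ((pvT cs).tail) = pvGoB false (cs.dropWhile (· ≠ ' ')) := by
  induction cs with
  | nil => refine ⟨by simp [pvT, pvFilt, pvGoB], by simp [pvT, pvConsHead, pvFilt, pvGoB], by simp [pvT, pvFilt, pvGoB]⟩
  | cons c cs ih =>
    obtain ⟨ih1, ih2, ih3⟩ := ih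
    by_cases h : c = ' '
    · subst h
      refine ⟨?_, ?_, ?_⟩
      · rw [show pvGoB true (' ' :: cs) = pvGoB false cs from by simp [pvGoB]]
        rw [← ih2]
        simp [pvT, pvFilt]
      · rw [show pvGoB false (' ' :: cs) = pvGoB false cs from by simp [pvGoB]]
        rw [← ih2]
        simp only [pvT, pvConsHead]
        simp [pvFilt]
      · have hd : (' ' :: cs).dropWhile (· ≠ ' ') = ' ' :: cs := by
          simp
        rw [hd, show pvGoB false (' ' :: cs) = pvGoB false cs from by simp [pvGoB], ← ih2]
        simp [pvT]
    · cases hT : pvT cs with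
      | nil => exact absurd hT (pvT_ne_nil cs)
      | cons t ts =>
        have ht : t = cs.takeWhile (· ≠ ' ') := by
          have := pvT_head? cs; rw [hT] at this; simpa using this
        rw [hT] at ih3
        simp only [List.tail_cons] at ih3
        refine ⟨?_, ?_, ?_⟩
        · rw [show pvGoB true (c :: cs) =
              (c :: cs.takeWhile (· ≠ ' ')) :: pvGoB false (cs.dropWhile (· ≠ ' ')) from by
            simp [pvGoB, h]]
          simp only [pvT, if_neg h, hT, pvConsHead]
          rw [← ih3, ← ht]
          simp [pvFilt, h, ht]
        · rw [show pvGoB false (c :: cs) =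
              (' ' :: c :: cs.takeWhile (· ≠ ' ')) :: pvGoB false (cs.dropWhile (· ≠ ' ')) from by
            simp [pvGoB, h]]
          simp only [pvT, if_neg h, hT, pvConsHead]
          rw [← ih3, ← ht]
          simp [pvFilt, ht]
        · have hd : (c :: cs).dropWhile (· ≠ ' ') = cs.dropWhile (· ≠ ' ') := by
            simp [h]
          rw [hd, ← ih3]
          simp [pvT, if_neg h, hT, pvConsHead]

-- ===== VERDICT (by name: the statement is the Claim_ definition above) =====
theorem slice_string_spec : Claim_equal_slice_string := by
  intro string1 _
  unfold Spec_slice_string slice_string slice_string_alt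
  have h1 : pvToksA string1.toList (pvWsA string1.toList) =
      pvPieces string1.toList 0 (pvSpaceIdx string1.toList) := by
    rw [pvToksA_eq_map, map_range_adj, pvWsA_eq]
    exact pvAdjMap_pieces _ _ _
  rw [h1, pieces_eq_T, pvFilt_removeAll, (main_three string1.toList).1]
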